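-- pv_equiv track=rewrite | github.com/schnock-art/pixel-sheriff | apps/api/src/sheriff_api/routers/datasets.py | _folder_match
-- ===== SOURCE A (Python) =====
-- def _folder_match(path: str, prefixes: list[str]) -> bool:
--     if not prefixes:
--         return False
--     normalized_path = path.replace("\\", "/").strip("/")
--     for prefix in prefixes:
--         normalized_prefix = prefix.replace("\\", "/").strip("/")
--         if not normalized_prefix:
--             continue
--         if normalized_path == normalized_prefix or normalized_path.startswith(f"{normalized_prefix}/"):
--             return True
--     return False
-- ===== SOURCE B (Python) =====
-- def _folder_match(path: str, prefixes: list[str]) -> bool: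
--     def norm(s):
--         return s.replace("\\", "/").strip("/")
--     pset = {q for q in map(norm, prefixes) if q}
--     np = norm(path)
--     for i, ch in enumerate(np):
--         if ch == "/" and np[:i] in pset:
--             return True
--     return np in pset
-- ===== Notes on version B (the rewrite author's own statement) =====
-- stated objective: alternative
-- what changed: Instead of scanning the prefix list and testing equality/startswith per prefix, B normalizes the prefixes once into a set and walks the normalized path's slash positions, testing each ancestor prefix (and finally the whole path) for set membership.
import Mathlib
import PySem

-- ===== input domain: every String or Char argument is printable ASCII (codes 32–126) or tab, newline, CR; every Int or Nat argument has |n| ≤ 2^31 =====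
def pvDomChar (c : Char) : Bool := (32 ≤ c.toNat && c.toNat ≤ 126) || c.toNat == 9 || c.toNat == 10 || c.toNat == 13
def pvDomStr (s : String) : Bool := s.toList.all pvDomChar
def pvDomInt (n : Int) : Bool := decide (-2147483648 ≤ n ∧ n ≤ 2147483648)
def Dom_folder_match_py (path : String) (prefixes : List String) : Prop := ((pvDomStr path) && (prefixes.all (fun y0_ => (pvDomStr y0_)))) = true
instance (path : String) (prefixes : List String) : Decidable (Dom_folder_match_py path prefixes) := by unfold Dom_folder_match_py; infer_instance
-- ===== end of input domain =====

-- B replaces A's per-prefix equality/startswith scan by one normalized-prefix set plus a walk over the path's ancestor prefixes (objective: alternative, same cost class).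

-- ===== PORT A =====
-- A's for-loop with early return, over the prefix list
def folderMatchGoA (np : String) : List String → Bool
  | [] => false
  | p :: rest =>
    let npre := PySem.Str.stripChars (PySem.Str.replace p "\\" "/") "/"
    if npre = "" then folderMatchGoA np rest
    else if np = npre ∨ PySem.Str.startswith np (npre ++ "/") = true then true
    else folderMatchGoA np rest

def folder_match_py (path : String) (prefixes : List String) : Bool :=
  if prefixes = [] then false
  else
    let normalized_path := PySem.Str.stripChars (PySem.Str.replace path "\\" "/") "/"
    folderMatchGoA normalized_path prefixes

-- ===== PORT B =====
def folderNorm (s : String) : String := PySem.Str.stripChars (PySem.Str.replace s "\\" "/") "/"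

-- B's for-loop over enumerate(np), testing each ancestor np[:i] at a slash
def folderMatchGoB (pset : PySem.Set String) (np : String) : List (Int × Char) → Bool
  | [] => false
  | (i, ch) :: rest =>
    if ch = '/' ∧ PySem.Set.contains pset (PySem.Str.slice np none (some i)) = true then true
    else folderMatchGoB pset np rest

def folder_match_py_alt (path : String) (prefixes : List String) : Bool :=
  let pset : PySem.Set String := PySem.Set.ofList ((prefixes.map folderNorm).filter (fun q => q ≠ ""))
  let np := folderNorm path
  if folderMatchGoB pset np (PySem.List.enumerate np.toList 0) then true
  else PySem.Set.contains pset np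

-- ===== PRECONDITION & SPEC =====
def Spec_folder_match_py (path : String) (prefixes : List String) (out : Bool) : Prop := out = folder_match_py_alt path prefixes
instance (path : String) (prefixes : List String) (out : Bool) : Decidable (Spec_folder_match_py path prefixes out) := by unfold Spec_folder_match_py; infer_instance

-- ===== CLAIM (what is proved, stated in full; the proofs are below) =====
def Claim_equal_folder_match_py : Prop := ∀ (path : String) (prefixes : List String), Dom_folder_match_py path prefixes → Spec_folder_match_py path prefixes (folder_match_py path prefixes)

-- ===== LEMMAS AND PROOFS =====

-- A's loop returns true iff some prefix normalizes to a nonempty string that is the path or a slash-terminated prefix of it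
theorem goA_iff (np : String) (ps : List String) :
    folderMatchGoA np ps = true ↔
      ∃ p ∈ ps, folderNorm p ≠ "" ∧ (np = folderNorm p ∨ PySem.Str.startswith np (folderNorm p ++ "/") = true) := by
  induction ps with
  | nil => simp [folderMatchGoA]
  | cons p rest ih =>
    show (if folderNorm p = "" then folderMatchGoA np rest
          else if np = folderNorm p ∨ PySem.Str.startswith np (folderNorm p ++ "/") = true then true
          else folderMatchGoA np rest) = true ↔ _
    by_cases h1 : folderNorm p = ""
    · rw [if_pos h1, ih]
      constructor
      · rintro ⟨q, hq, h⟩; exact ⟨q, List.mem_cons_of_mem _ hq, h⟩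
      · rintro ⟨q, hq, hne, h⟩
        rcases List.mem_cons.mp hq with rfl | hq'
        · exact absurd h1 hne
        · exact ⟨q, hq', hne, h⟩
    · rw [if_neg h1]
      by_cases h2 : np = folderNorm p ∨ PySem.Str.startswith np (folderNorm p ++ "/") = true
      · rw [if_pos h2]
        exact ⟨fun _ => ⟨p, List.mem_cons_self, h1, h2⟩, fun _ => rfl⟩
      · rw [if_neg h2, ih]
        constructor
        · rintro ⟨q, hq, h⟩; exact ⟨q, List.mem_cons_of_mem _ hq, h⟩
        · rintro ⟨q, hq, hne, h⟩
          rcases List.mem_cons.mp hq with rfl | hq'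
          · exact absurd h h2
          · exact ⟨q, hq', hne, h⟩

-- B's loop returns true iff some enumerated position holds '/' with its slice in the set
theorem goB_iff (pset : PySem.Set String) (np : String) (l : List (Int × Char)) :
    folderMatchGoB pset np l = true ↔
      ∃ pr ∈ l, pr.2 = '/' ∧ PySem.Set.contains pset (PySem.Str.slice np none (some pr.1)) = true := by
  induction l with
  | nil => simp [folderMatchGoB]
  | cons pr rest ih =>
    obtain ⟨i, ch⟩ := pr
    show (if ch = '/' ∧ PySem.Set.contains pset (PySem.Str.slice np none (some i)) = true then true
          else folderMatchGoB pset np rest) = true ↔ _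
    by_cases h : ch = '/' ∧ PySem.Set.contains pset (PySem.Str.slice np none (some i)) = true
    · rw [if_pos h]
      exact ⟨fun _ => ⟨(i, ch), List.mem_cons_self, h⟩, fun _ => rfl⟩
    · rw [if_neg h, ih]
      constructor
      · rintro ⟨q, hq, hh⟩; exact ⟨q, List.mem_cons_of_mem _ hq, hh⟩
      · rintro ⟨q, hq, hh⟩
        rcases List.mem_cons.mp hq with rfl | hq'
        · exact absurd hh h
        · exact ⟨q, hq', hh⟩

-- a slash-terminated prefix of a char list = a take at a '/' position
theorem append_slash_prefix_iff (qs cs : List Char) :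
    qs ++ ['/'] <+: cs ↔ ∃ k, ∃ h : k < cs.length, cs[k] = '/' ∧ cs.take k = qs := by
  constructor
  · rintro ⟨t, ht⟩
    subst ht
    refine ⟨qs.length, by simp, ?_, ?_⟩
    · rw [List.getElem_append_left (by simp), List.getElem_append_right (le_refl _)]
      simp
    · rw [List.append_assoc, List.take_left]
  · rintro ⟨k, hk, hch, htake⟩
    have heq : cs.take k ++ ['/'] ++ cs.drop (k + 1) = cs := by
      rw [List.append_assoc, List.singleton_append, ← hch, ← List.drop_eq_getElem_cons hk,
        List.take_append_drop]
    exact ⟨cs.drop (k + 1), by rw [htake] at heq; exact heq⟩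

-- membership in B's normalized-prefix set
theorem mem_pset_iff (prefixes : List String) (q : String) :
    PySem.Set.contains (PySem.Set.ofList ((prefixes.map folderNorm).filter (fun q => q ≠ ""))) q = true ↔
      q ≠ "" ∧ ∃ p ∈ prefixes, folderNorm p = q := by
  rw [PySem.Set.contains_iff, PySem.Set.mem_ofList, List.mem_filter]
  simp only [List.mem_map, decide_eq_true_eq]
  constructor
  · rintro ⟨⟨p, hp, hq⟩, hne⟩
    exact ⟨hne, p, hp, hq⟩
  · rintro ⟨hne, p, hp, hq⟩
    exact ⟨⟨p, hp, hq⟩, hne⟩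

-- np[:k] as a string, for k an in-range Nat index
theorem slice_toList (np : String) (k : Nat) :
    (PySem.Str.slice np none (some (k : Int))).toList = np.toList.take k := by
  simp [PySem.List.slice_to_natCast]

-- startswith np (q ++ "/") in terms of a slash position of np
theorem startswith_slash_iff (np q : String) :
    PySem.Str.startswith np (q ++ "/") = true ↔
      ∃ k, ∃ h : k < np.toList.length, np.toList[k] = '/' ∧ PySem.Str.slice np none (some (k : Int)) = q := by
  rw [show PySem.Str.startswith np (q ++ "/") = PySem.Chars.startswith np.toList (q.toList ++ ['/']) by
        simp [PySem.Str.startswith_eq],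
      PySem.Chars.startswith_iff, append_slash_prefix_iff]
  constructor
  · rintro ⟨k, hk, hch, htake⟩
    exact ⟨k, hk, hch, by rw [← String.toList_inj, slice_toList, htake]⟩
  · rintro ⟨k, hk, hch, hsl⟩
    exact ⟨k, hk, hch, by rw [← String.toList_inj, slice_toList] at hsl; exact hsl⟩

-- the central equivalence, for a fixed normalized path
theorem central_iff (np : String) (prefixes : List String) :
    (let pset : PySem.Set String := PySem.Set.ofList ((prefixes.map folderNorm).filter (fun q => q ≠ ""));
     if folderMatchGoB pset np (PySem.List.enumerate np.toList 0) then true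
     else PySem.Set.contains pset np) = folderMatchGoA np prefixes := by
  rw [Bool.eq_iff_iff]
  simp only []
  set pset : PySem.Set String := PySem.Set.ofList ((prefixes.map folderNorm).filter (fun q => q ≠ "")) with hpset
  rw [goA_iff]
  constructor
  · intro h
    by_cases hgo : folderMatchGoB pset np (PySem.List.enumerate np.toList 0) = true
    · obtain ⟨pr, hmem, hch, hcon⟩ := (goB_iff pset np _).mp hgo
      obtain ⟨k, hk, hpr⟩ := (PySem.List.mem_enumerate_iff _ _ _).mp hmem
      subst hpr
      simp only [] at hch hcon
      rw [zero_add] at hcon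
      obtain ⟨hne, p, hp, hq⟩ := (mem_pset_iff prefixes _).mp hcon
      refine ⟨p, hp, by rw [hq]; exact hne, Or.inr ?_⟩
      rw [startswith_slash_iff]
      exact ⟨k, hk, hch, by rw [hq]⟩
    · rw [if_neg hgo] at h
      obtain ⟨hne, p, hp, hq⟩ := (mem_pset_iff prefixes np).mp h
      exact ⟨p, hp, by rw [hq]; exact hne, Or.inl hq.symm⟩
  · rintro ⟨p, hp, hne, hcase | hsw⟩
    · have hcon : PySem.Set.contains pset np = true :=
        (mem_pset_iff prefixes np).mpr ⟨by rw [hcase]; exact hne, p, hp, hcase.symm⟩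
      by_cases hgo : folderMatchGoB pset np (PySem.List.enumerate np.toList 0) = true
      · rw [if_pos hgo]
      · rw [if_neg hgo]; exact hcon
    · obtain ⟨k, hk, hch, hsl⟩ := (startswith_slash_iff np (folderNorm p)).mp hsw
      have hcon : PySem.Set.contains pset (PySem.Str.slice np none (some (k : Int))) = true :=
        (mem_pset_iff prefixes _).mpr ⟨by rw [hsl]; exact hne, p, hp, hsl.symm⟩
      have hgo : folderMatchGoB pset np (PySem.List.enumerate np.toList 0) = true := by
        rw [goB_iff]
        refine ⟨((0 : Int) + k, np.toList[k]), (PySem.List.mem_enumerate_iff _ _ _).mpr ⟨k, hk, rfl⟩, hch, ?_⟩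
        rw [zero_add]; exact hcon
      rw [if_pos hgo]

-- ===== VERDICT (by name: the statement is the Claim_ definition above) =====
theorem folder_match_py_spec : Claim_equal_folder_match_py := by
  intro path prefixes _
  unfold Spec_folder_match_py folder_match_py folder_match_py_alt
  by_cases hnil : prefixes = []
  · subst hnil
    rw [if_pos rfl]
    have h := central_iff (folderNorm path) []
    simpa [folderMatchGoA] using h.symm
  · rw [if_neg hnil]
    exact (central_iff (folderNorm path) prefixes).symm
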